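-- pv_equiv track=rewrite | github.com/deepthought42/Khala-Agentic-AI-Teams | backend/agents/software_engineering_team/planning_v2_team/output_templates.py | _collect_all_file_updates_sections
-- ===== SOURCE A (Python) =====
-- from typing import Any, Dict, List
--
-- MARKER_FILE_UPDATES = "## FILE_UPDATES ##"
--
-- MARKER_END_FILE_UPDATES = "## END FILE_UPDATES ##"
--
-- MARKER_FILE_UPDATES_CONTINUED = "## FILE_UPDATES (CONTINUED) ##"
--
-- MARKER_END_FILE_UPDATES_CONTINUED = "## END FILE_UPDATES (CONTINUED) ##"
--
-- def _collect_all_file_updates_sections(text: str) -> List[str]: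
--     """Collect every FILE_UPDATES block (including CONTINUED) from merged continuation text.
--
--     When the LLM response is continued across multiple chunks, later chunks may add
--     another ## FILE_UPDATES ## or ## FILE_UPDATES (CONTINUED) ## block. We need all
--     of them so the written document includes the full content, not just the first block.
--     """
--     sections: List[str] = []
--     markers_start = (MARKER_FILE_UPDATES, MARKER_FILE_UPDATES_CONTINUED)
--     markers_end = (MARKER_END_FILE_UPDATES, MARKER_END_FILE_UPDATES_CONTINUED)
--     pos = 0
--     while pos < len(text):
--         start_idx = -1
--         start_marker = ""
--         for m in markers_start:
--             i = text.find(m, pos)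
--             if i != -1 and (start_idx == -1 or i < start_idx):
--                 start_idx = i
--                 start_marker = m
--         if start_idx == -1:
--             break
--         content_start = start_idx + len(start_marker)
--         end_idx = -1
--         for m in markers_end:
--             i = text.find(m, content_start)
--             if i != -1 and (end_idx == -1 or i < end_idx):
--                 end_idx = i
--         if end_idx == -1:
--             end_idx = len(text)
--         section = text[content_start:end_idx].strip()
--         if section:
--             sections.append(section)
--         # Advance past the end marker we actually found (so we don't skip into next block)
--         end_marker_len = 0
--         for m in markers_end:
--             if text[end_idx:end_idx + len(m)] == m:
--                 end_marker_len = len(m)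
--                 break
--         if not end_marker_len:
--             end_marker_len = len(MARKER_END_FILE_UPDATES)
--         pos = end_idx + end_marker_len
--     return sections
-- ===== SOURCE B (Python) =====
-- from typing import List
--
-- MARKER_FILE_UPDATES = "## FILE_UPDATES ##"
-- MARKER_END_FILE_UPDATES = "## END FILE_UPDATES ##"
-- MARKER_FILE_UPDATES_CONTINUED = "## FILE_UPDATES (CONTINUED) ##"
-- MARKER_END_FILE_UPDATES_CONTINUED = "## END FILE_UPDATES (CONTINUED) ##"
--
-- _STARTS = (MARKER_FILE_UPDATES, MARKER_FILE_UPDATES_CONTINUED)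
-- _ENDS = (MARKER_END_FILE_UPDATES, MARKER_END_FILE_UPDATES_CONTINUED)
--
--
-- def _collect_all_file_updates_sections(text: str) -> List[str]:
--     """Single left-to-right state-machine scan: outside a block, advance until a
--     start marker begins at the cursor; inside, advance until an end marker begins
--     (or the text ends), emitting the stripped content when non-empty."""
--     sections: List[str] = []
--     i = 0
--     n = len(text)
--     inside = False
--     content_start = 0
--     while i < n:
--         if not inside:
--             if text.startswith(_STARTS[0], i):
--                 i += len(_STARTS[0])
--                 content_start = i
--                 inside = True
--             elif text.startswith(_STARTS[1], i):
--                 i += len(_STARTS[1])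
--                 content_start = i
--                 inside = True
--             else:
--                 i += 1
--         else:
--             if text.startswith(_ENDS[0], i):
--                 sec = text[content_start:i].strip()
--                 if sec:
--                     sections.append(sec)
--                 i += len(_ENDS[0])
--                 inside = False
--             elif text.startswith(_ENDS[1], i):
--                 sec = text[content_start:i].strip()
--                 if sec:
--                     sections.append(sec)
--                 i += len(_ENDS[1])
--                 inside = False
--             else:
--                 i += 1
--     if inside:
--         sec = text[content_start:].strip()
--         if sec:
--             sections.append(sec)
--     return sections
-- ===== Notes on version B (the rewrite author's own statement) =====
-- stated objective: alternative
-- what changed: Replaced A's repeated min-of-two text.find searches with a single left-to-right state-machine scan (outside/inside flag) that tests startswith at the cursor and emits each stripped section as it closes.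
import Mathlib
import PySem

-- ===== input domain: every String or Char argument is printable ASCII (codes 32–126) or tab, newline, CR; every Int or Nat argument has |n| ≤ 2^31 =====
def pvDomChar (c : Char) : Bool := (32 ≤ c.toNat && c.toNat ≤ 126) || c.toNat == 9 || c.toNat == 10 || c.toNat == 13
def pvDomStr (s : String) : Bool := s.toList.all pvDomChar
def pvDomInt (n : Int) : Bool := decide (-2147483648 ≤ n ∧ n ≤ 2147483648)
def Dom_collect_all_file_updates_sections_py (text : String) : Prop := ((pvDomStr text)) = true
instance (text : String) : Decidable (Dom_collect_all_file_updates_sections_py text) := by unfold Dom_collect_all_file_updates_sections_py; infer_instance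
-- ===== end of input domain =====

-- B replaces A's repeated min-of-two `text.find` marker searches by a single left-to-right
-- state-machine scan (outside/inside flag, `startswith` at the cursor); alternative, not faster.

-- The four module-level marker constants, as code-point lists
def pvMS1 : List Char := "## FILE_UPDATES ##".toList
def pvMS2 : List Char := "## FILE_UPDATES (CONTINUED) ##".toList
def pvME1 : List Char := "## END FILE_UPDATES ##".toList
def pvME2 : List Char := "## END FILE_UPDATES (CONTINUED) ##".toList

-- ===== PORT A =====
-- one iteration of A's `for m in markers` scan: keep the smaller non-(-1) find index and its marker
def pvMinStep (cs : List Char) (k : Int) (st : Int × List Char) (m : List Char) : Int × List Char :=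
  let i := PySem.Chars.findFrom cs m k
  if i ≠ -1 ∧ (st.1 = -1 ∨ i < st.1) then (i, m) else st

-- the two-iteration `for m in markers` loop over the marker 2-tuple, from (-1, "")
def pvFindMin2 (cs m1 m2 : List Char) (k : Int) : Int × List Char :=
  pvMinStep cs k (pvMinStep cs k (-1, []) m1) m2

-- while pos < len(text): find the earliest start marker, then the earliest end marker
-- (the end-marker loop keeps only the index), strip the slice between them, advance past the
-- end marker; pos, a nonnegative int throughout, is kept as Nat
def pvALoop (cs : List Char) (pos : Nat) (sections : List (List Char)) : List (List Char) :=
  if _hpos : pos < cs.length then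
    let st := pvFindMin2 cs pvMS1 pvMS2 (pos : Int)
    if _hst : st.1 = -1 then sections
    else
      let contentStart : Int := st.1 + st.2.length
      let f := (pvFindMin2 cs pvME1 pvME2 contentStart).1
      let endIdx : Int := if f = -1 then (cs.length : Int) else f
      let sec := PySem.Chars.strip (PySem.Chars.slice cs (some contentStart) (some endIdx))
      let sections' := if sec ≠ [] then sections ++ [sec] else sections
      -- for m in markers_end: text[end_idx:end_idx+len(m)] == m (two iterations, unrolled)
      let eml0 : Nat :=
        if PySem.Chars.slice cs (some endIdx) (some (endIdx + (pvME1.length : Int))) = pvME1 then pvME1.length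
        else if PySem.Chars.slice cs (some endIdx) (some (endIdx + (pvME2.length : Int))) = pvME2 then pvME2.length
        else 0
      let eml : Nat := if eml0 = 0 then pvME1.length else eml0
      -- Python's new pos (end_idx + end_marker_len) always exceeds pos; the max with pos + 1
      -- is a termination guard only and never changes the value (discharged in pv_inside_case)
      pvALoop cs (Nat.max (pos + 1) ((endIdx + (eml : Int)).toNat)) sections'
  else sections
termination_by cs.length - pos
decreasing_by
  exact Nat.sub_lt_sub_left _hpos
    (Nat.lt_of_lt_of_le (Nat.lt_succ_self pos) (Nat.le_max_left _ _))

def collect_all_file_updates_sections_py (text : String) : List String :=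
  (pvALoop text.toList 0 []).map String.ofList

-- ===== PORT B =====
-- the decreasing argument of B's scan, as one named theorem (cited by decreasing_by)
theorem pvB_dec (n i k : Nat) (h : i < n) (hk : k ≠ 0) : n - (i + k) < n - i := by omega

-- single scan with an outside/inside flag; text.startswith(m, i) is startswith on drop i
-- (i ≤ len throughout, where the two coincide); text[a:b] and text[a:] stay PySem slices
def pvBLoop (cs : List Char) (i : Nat) (inside : Bool) (contentStart : Nat)
    (sections : List (List Char)) : List (List Char) :=
  if i < cs.length then
    if inside = false then
      if PySem.Chars.startswith (cs.drop i) pvMS1 then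
        pvBLoop cs (i + pvMS1.length) true (i + pvMS1.length) sections
      else if PySem.Chars.startswith (cs.drop i) pvMS2 then
        pvBLoop cs (i + pvMS2.length) true (i + pvMS2.length) sections
      else pvBLoop cs (i + 1) inside contentStart sections
    else
      if PySem.Chars.startswith (cs.drop i) pvME1 then
        let sec := PySem.Chars.strip (PySem.Chars.slice cs (some (contentStart : Int)) (some (i : Int)))
        pvBLoop cs (i + pvME1.length) false contentStart (if sec ≠ [] then sections ++ [sec] else sections)
      else if PySem.Chars.startswith (cs.drop i) pvME2 then
        let sec := PySem.Chars.strip (PySem.Chars.slice cs (some (contentStart : Int)) (some (i : Int)))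
        pvBLoop cs (i + pvME2.length) false contentStart (if sec ≠ [] then sections ++ [sec] else sections)
      else pvBLoop cs (i + 1) inside contentStart sections
  else
    if inside then
      let sec := PySem.Chars.strip (PySem.Chars.slice cs (some (contentStart : Int)) none)
      if sec ≠ [] then sections ++ [sec] else sections
    else sections
termination_by cs.length - i
decreasing_by
  · exact pvB_dec cs.length i pvMS1.length ‹_› (by decide)
  · exact pvB_dec cs.length i pvMS2.length ‹_› (by decide)
  · exact pvB_dec cs.length i 1 ‹_› (by decide)
  · exact pvB_dec cs.length i pvME1.length ‹_› (by decide)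
  · exact pvB_dec cs.length i pvME2.length ‹_› (by decide)
  · exact pvB_dec cs.length i 1 ‹_› (by decide)

def collect_all_file_updates_sections_py_alt (text : String) : List String :=
  (pvBLoop text.toList 0 false 0 []).map String.ofList

-- ===== PRECONDITION & SPEC =====
def Spec_collect_all_file_updates_sections_py (text : String) (out : List String) : Prop := out = collect_all_file_updates_sections_py_alt text
instance (text : String) (out : List String) : Decidable (Spec_collect_all_file_updates_sections_py text out) := by unfold Spec_collect_all_file_updates_sections_py; infer_instance

-- ===== CLAIM (what is proved, stated in full; the proofs are below) =====
def Claim_equal_collect_all_file_updates_sections_py : Prop := ∀ (text : String), Dom_collect_all_file_updates_sections_py text → Spec_collect_all_file_updates_sections_py text (collect_all_file_updates_sections_py text)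

-- ===== LEMMAS AND PROOFS =====

-- a failed find from k means no occurrence at any q ≥ k
theorem pv_no_match (cs m : List Char) (k : Nat) (hk : k ≤ cs.length)
    (h : PySem.Chars.findFrom cs m (k : Int) = -1) (q : Nat) (hq : k ≤ q) :
    ¬ m <+: cs.drop q := by
  intro hpre
  rw [PySem.Chars.findFrom_natCast_eq_neg_one_iff cs m k hk] at h
  apply h
  rw [← PySem.Chars.isIn_iff_infix, ← PySem.Chars.exists_prefix_drop_iff_isIn]
  refine ⟨q - k, ?_⟩
  rw [List.drop_drop]
  have he : k + (q - k) = q := by omega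
  rwa [he]

-- a marker matching at p fits inside cs
theorem pv_match_bound (cs m : List Char) (p : Nat) (hm : m ≠ []) (h : m <+: cs.drop p) :
    p + m.length ≤ cs.length := by
  have h1 := h.length_le
  simp only [List.length_drop] at h1
  by_cases hp : p ≤ cs.length
  · have : 0 < m.length := List.length_pos_iff.mpr hm
    omega
  · exfalso
    rw [List.drop_eq_nil_of_le (by omega)] at h
    exact hm (List.prefix_nil.mp h)

-- what A's two-marker find loop computes: either no marker occurs at or after k, or it returns
-- the first matching position together with the matching marker (first tuple entry preferred)
theorem pvFindMin2_spec (cs m1 m2 : List Char) (k : Nat) (hk : k ≤ cs.length) :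
    ((pvFindMin2 cs m1 m2 (k : Int)).1 = -1 ∧
      ∀ q, k ≤ q → ¬ m1 <+: cs.drop q ∧ ¬ m2 <+: cs.drop q) ∨
    (∃ p : Nat, (pvFindMin2 cs m1 m2 (k : Int)).1 = (p : Int) ∧ k ≤ p ∧
      (∀ q, k ≤ q → q < p → ¬ m1 <+: cs.drop q ∧ ¬ m2 <+: cs.drop q) ∧
      (((pvFindMin2 cs m1 m2 (k : Int)).2 = m1 ∧ m1 <+: cs.drop p) ∨
       ((pvFindMin2 cs m1 m2 (k : Int)).2 = m2 ∧ m2 <+: cs.drop p ∧ ¬ m1 <+: cs.drop p))) := by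
  simp only [pvFindMin2, pvMinStep]
  split_ifs with hc1 hc2 hc2
  · -- both markers occur; the second find is strictly smaller
    obtain ⟨h1ne, -⟩ := hc1
    obtain ⟨h2ne, h2or⟩ := hc2
    obtain ⟨ge1, pre1, min1⟩ := PySem.Chars.findFrom_natCast_spec cs m1 k hk h1ne
    obtain ⟨ge2, pre2, min2⟩ := PySem.Chars.findFrom_natCast_spec cs m2 k hk h2ne
    have hlt : PySem.Chars.findFrom cs m2 ↑k < PySem.Chars.findFrom cs m1 ↑k := by
      rcases h2or with h | h
      · exact absurd h h1ne
      · exact h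
    refine Or.inr ⟨(PySem.Chars.findFrom cs m2 (k : Int)).toNat, by dsimp only; omega,
      by omega, ?_, Or.inr ⟨rfl, pre2, min1 _ (by omega) (by omega)⟩⟩
    intro q hq hql
    exact ⟨min1 q hq (by omega), min2 q hq (by omega)⟩
  · -- only the first find (or the smaller one) is kept
    obtain ⟨h1ne, -⟩ := hc1
    obtain ⟨ge1, pre1, min1⟩ := PySem.Chars.findFrom_natCast_spec cs m1 k hk h1ne
    refine Or.inr ⟨(PySem.Chars.findFrom cs m1 (k : Int)).toNat, by dsimp only; omega,
      by omega, ?_, Or.inl ⟨rfl, pre1⟩⟩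
    intro q hq hql
    refine ⟨min1 q hq (by omega), ?_⟩
    by_cases h2ne : PySem.Chars.findFrom cs m2 (k : Int) = -1
    · exact pv_no_match cs m2 k hk h2ne q hq
    · obtain ⟨ge2, pre2, min2⟩ := PySem.Chars.findFrom_natCast_spec cs m2 k hk h2ne
      have hge : PySem.Chars.findFrom cs m1 (k : Int) ≤ PySem.Chars.findFrom cs m2 (k : Int) := by
        push Not at hc2
        have h' := hc2 h2ne
        dsimp only at h'
        exact h'.2
      exact min2 q hq (by omega)
  · -- the first marker never occurs, the second does
    have h1 : PySem.Chars.findFrom cs m1 (k : Int) = -1 := by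
      by_contra h
      exact hc1 ⟨h, Or.inl trivial⟩
    obtain ⟨h2ne, -⟩ := hc2
    obtain ⟨ge2, pre2, min2⟩ := PySem.Chars.findFrom_natCast_spec cs m2 k hk h2ne
    refine Or.inr ⟨(PySem.Chars.findFrom cs m2 (k : Int)).toNat, by dsimp only; omega,
      by omega, ?_,
      Or.inr ⟨rfl, pre2, pv_no_match cs m1 k hk h1 _ (by omega)⟩⟩
    intro q hq hql
    exact ⟨pv_no_match cs m1 k hk h1 q hq, min2 q hq (by omega)⟩
  · -- neither marker occurs
    have h1 : PySem.Chars.findFrom cs m1 (k : Int) = -1 := by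
      by_contra h
      exact hc1 ⟨h, Or.inl trivial⟩
    have h2 : PySem.Chars.findFrom cs m2 (k : Int) = -1 := by
      by_contra h
      exact hc2 ⟨h, Or.inl rfl⟩
    exact Or.inl ⟨rfl, fun q hq =>
      ⟨pv_no_match cs m1 k hk h1 q hq, pv_no_match cs m2 k hk h2 q hq⟩⟩

-- slice cs [q : q+|m|] equals m iff m matches at q
theorem pv_slice_marker_iff (cs m : List Char) (q : Nat) :
    (PySem.Chars.slice cs (some (q : Int)) (some ((q : Int) + (m.length : Int))) = m) ↔
      m <+: cs.drop q := by
  rw [PySem.Chars.slice_eq_listSlice, PySem.List.slice_natCast_add]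
  constructor
  · intro h
    rw [← h]
    exact List.take_prefix _ _
  · intro h
    exact (List.prefix_iff_eq_take.mp h).symm

-- text[csn:len(text)] and text[csn:] are the same slice
theorem pv_slice_to_len (cs : List Char) (csn : Nat) :
    PySem.Chars.slice cs (some (csn : Int)) (some (cs.length : Int)) =
      PySem.Chars.slice cs (some (csn : Int)) none := by
  rw [PySem.Chars.slice_eq_listSlice, PySem.Chars.slice_eq_listSlice,
    PySem.List.slice_natCast, PySem.List.slice_from_natCast]
  exact List.take_of_length_le (by simp [List.length_drop])

-- B stops when the cursor reaches the end outside a block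
theorem pvBLoop_stop_out (cs : List Char) (i c0 : Nat) (acc : List (List Char))
    (h : ¬ i < cs.length) : pvBLoop cs i false c0 acc = acc := by
  rw [pvBLoop]; simp [h]

-- A stops when pos reaches the end
theorem pvALoop_stop (cs : List Char) (pos : Nat) (acc : List (List Char))
    (h : ¬ pos < cs.length) : pvALoop cs pos acc = acc := by
  rw [pvALoop]; simp [h]

-- B's outside scan passes over any start-marker-free stretch unchanged
theorem pv_skip_out (cs : List Char) (c0 : Nat) (acc : List (List Char)) :
    ∀ d i j, i ≤ j → j - i ≤ d →
    (∀ q, i ≤ q → q < j → ¬ pvMS1 <+: cs.drop q ∧ ¬ pvMS2 <+: cs.drop q) →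
    pvBLoop cs i false c0 acc = pvBLoop cs j false c0 acc := by
  intro d
  induction d with
  | zero =>
    intro i j hij hd _
    have h : i = j := by omega
    subst h
    rfl
  | succ d ih =>
    intro i j hij hd h
    by_cases he : i = j
    · rw [he]
    have hij' : i < j := by omega
    by_cases hl : i < cs.length
    · rw [pvBLoop]
      have h1 : PySem.Chars.startswith (cs.drop i) pvMS1 = false := by
        rw [Bool.eq_false_iff, ne_eq, PySem.Chars.startswith_iff]; exact (h i le_rfl hij').1
      have h2 : PySem.Chars.startswith (cs.drop i) pvMS2 = false := by
        rw [Bool.eq_false_iff, ne_eq, PySem.Chars.startswith_iff]; exact (h i le_rfl hij').2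
      simp only [hl, if_true, h1, h2, Bool.false_eq_true, if_false]
      exact ih (i + 1) j (by omega) (by omega) (fun q hq1 hq2 => h q (by omega) hq2)
    · rw [pvBLoop_stop_out cs i c0 acc hl, pvBLoop_stop_out cs j c0 acc (by omega)]

-- B's inside scan passes over any end-marker-free stretch unchanged
theorem pv_skip_in (cs : List Char) (c0 : Nat) (acc : List (List Char)) :
    ∀ d i j, i ≤ j → j - i ≤ d →
    (∀ q, i ≤ q → q < j → ¬ pvME1 <+: cs.drop q ∧ ¬ pvME2 <+: cs.drop q) →
    pvBLoop cs i true c0 acc = pvBLoop cs j true c0 acc := by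
  intro d
  induction d with
  | zero =>
    intro i j hij hd _
    have h : i = j := by omega
    subst h
    rfl
  | succ d ih =>
    intro i j hij hd h
    by_cases he : i = j
    · rw [he]
    have hij' : i < j := by omega
    by_cases hl : i < cs.length
    · rw [pvBLoop]
      have h1 : PySem.Chars.startswith (cs.drop i) pvME1 = false := by
        rw [Bool.eq_false_iff, ne_eq, PySem.Chars.startswith_iff]; exact (h i le_rfl hij').1
      have h2 : PySem.Chars.startswith (cs.drop i) pvME2 = false := by
        rw [Bool.eq_false_iff, ne_eq, PySem.Chars.startswith_iff]; exact (h i le_rfl hij').2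
      simp only [hl, if_true, h1, h2, Bool.true_eq_false, if_false]
      exact ih (i + 1) j (by omega) (by omega) (fun q hq1 hq2 => h q (by omega) hq2)
    · conv_lhs => rw [pvBLoop]
      conv_rhs => rw [pvBLoop]
      have hjl : ¬ j < cs.length := by omega
      simp only [hl, hjl, if_false]

-- A's step from the moment a block's content starts (csn), as a named term
def pvATail (cs : List Char) (pos csn : Nat) (acc : List (List Char)) : List (List Char) :=
  let f := (pvFindMin2 cs pvME1 pvME2 (csn : Int)).1
  let endIdx : Int := if f = -1 then (cs.length : Int) else f
  let sec := PySem.Chars.strip (PySem.Chars.slice cs (some (csn : Int)) (some endIdx))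
  let sections' := if sec ≠ [] then acc ++ [sec] else acc
  let eml0 : Nat :=
    if PySem.Chars.slice cs (some endIdx) (some (endIdx + (pvME1.length : Int))) = pvME1 then pvME1.length
    else if PySem.Chars.slice cs (some endIdx) (some (endIdx + (pvME2.length : Int))) = pvME2 then pvME2.length
    else 0
  let eml : Nat := if eml0 = 0 then pvME1.length else eml0
  pvALoop cs (Nat.max (pos + 1) ((endIdx + (eml : Int)).toNat)) sections'

-- once a start marker is found at p, A's iteration is pvATail at the content start
theorem pvALoop_eq_tail (cs : List Char) (pos : Nat) (acc : List (List Char))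
    (hl : pos < cs.length) (p : Nat)
    (hA1 : (pvFindMin2 cs pvMS1 pvMS2 (pos : Int)).1 = (p : Int)) :
    pvALoop cs pos acc =
      pvATail cs pos (p + (pvFindMin2 cs pvMS1 pvMS2 (pos : Int)).2.length) acc := by
  rw [pvALoop, dif_pos hl, pvATail]
  simp only [hA1]
  rw [dif_neg (show ¬ ((p : Int) = -1) by omega)]
  push_cast
  rfl

-- from the content start, A's remaining step equals B's inside scan
theorem pv_inside_case (cs : List Char) (pos csn : Nat) (hpos : pos < csn)
    (hcs : csn ≤ cs.length) (acc : List (List Char))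
    (ihc : ∀ pos', csn < pos' → ∀ c0 acc',
      pvALoop cs pos' acc' = pvBLoop cs pos' false c0 acc') :
    pvATail cs pos csn acc = pvBLoop cs csn true csn acc := by
  rw [pvATail]
  rcases pvFindMin2_spec cs pvME1 pvME2 csn hcs with ⟨hE, hnone⟩ | ⟨q, hE1, hkq, hmin, hsel⟩
  · -- no end marker at or after csn: the block runs to the end of the text
    simp only [hE, reduceIte]
    have c1 : ¬ (PySem.Chars.slice cs (some ((cs.length : Nat) : Int))
        (some (((cs.length : Nat) : Int) + (pvME1.length : Int))) = pvME1) := by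
      rw [pv_slice_marker_iff]
      simp only [List.drop_length, List.prefix_nil]
      decide
    have c2 : ¬ (PySem.Chars.slice cs (some ((cs.length : Nat) : Int))
        (some (((cs.length : Nat) : Int) + (pvME2.length : Int))) = pvME2) := by
      rw [pv_slice_marker_iff]
      simp only [List.drop_length, List.prefix_nil]
      decide
    rw [if_neg c1, if_neg c2, if_pos rfl]
    have l1 : pvME1.length = 22 := by decide
    rw [pvALoop_stop cs (Nat.max (pos + 1) (((cs.length : Int) + (pvME1.length : Int)).toNat)) _
      (Nat.not_lt.mpr (le_trans (by omega) (Nat.le_max_right _ _)))]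
    rw [pv_skip_in cs csn acc (cs.length - csn) csn cs.length hcs le_rfl
      (fun q h1 h2 => hnone q h1)]
    rw [pvBLoop]
    simp only [lt_irrefl, if_false, if_true, pv_slice_to_len]
  · -- the block ends at the first end marker q
    have hq1 : pvME1 ≠ [] := by decide
    have hq2 : pvME2 ≠ [] := by decide
    have hqlen : q < cs.length := by
      rcases hsel with ⟨-, hpre⟩ | ⟨-, hpre, -⟩
      · have := pv_match_bound cs pvME1 q hq1 hpre
        have : 0 < pvME1.length := List.length_pos_iff.mpr hq1
        omega
      · have := pv_match_bound cs pvME2 q hq2 hpre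
        have : 0 < pvME2.length := List.length_pos_iff.mpr hq2
        omega
    simp only [hE1]
    rw [if_neg (show ¬ ((q : Int) = -1) by omega)]
    rw [pv_skip_in cs csn acc (q - csn) csn q hkq le_rfl (fun r h1 h2 => hmin r h1 h2)]
    rw [pvBLoop]
    simp only [hqlen, if_true, Bool.true_eq_false, if_false]
    rcases hsel with ⟨-, hpre⟩ | ⟨-, hpre, hnpre⟩
    · -- plain END marker matches at q
      have hsw : PySem.Chars.startswith (cs.drop q) pvME1 = true :=
        (PySem.Chars.startswith_iff _ _).mpr hpre
      rw [if_pos ((pv_slice_marker_iff cs pvME1 q).mpr hpre)]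
      rw [if_neg (show ¬ (pvME1.length = 0) by decide)]
      simp only [hsw, if_true]
      have h0 : 0 < pvME1.length := by decide
      have htn : ((q : Int) + (pvME1.length : Int)).toNat = q + pvME1.length := by omega
      have ht : Nat.max (pos + 1) (((q : Int) + (pvME1.length : Int)).toNat) = q + pvME1.length := by
        rw [htn]; exact Nat.max_eq_right (by omega)
      rw [ht]
      exact ihc (q + pvME1.length) (by omega) csn _
    · -- CONTINUED END marker matches at q (and the plain one does not)
      have hsw1 : PySem.Chars.startswith (cs.drop q) pvME1 = false := by
        rw [Bool.eq_false_iff, ne_eq, PySem.Chars.startswith_iff]; exact hnpre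
      have hsw2 : PySem.Chars.startswith (cs.drop q) pvME2 = true :=
        (PySem.Chars.startswith_iff _ _).mpr hpre
      rw [if_neg (fun hc => hnpre ((pv_slice_marker_iff cs pvME1 q).mp hc))]
      rw [if_pos ((pv_slice_marker_iff cs pvME2 q).mpr hpre)]
      rw [if_neg (show ¬ (pvME2.length = 0) by decide)]
      simp only [hsw1, hsw2, Bool.false_eq_true, if_false, if_true]
      have h0 : 0 < pvME2.length := by decide
      have htn : ((q : Int) + (pvME2.length : Int)).toNat = q + pvME2.length := by omega
      have ht : Nat.max (pos + 1) (((q : Int) + (pvME2.length : Int)).toNat) = q + pvME2.length := by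
        rw [htn]; exact Nat.max_eq_right (by omega)
      rw [ht]
      exact ihc (q + pvME2.length) (by omega) csn _

-- the central loop equivalence
theorem pv_main (cs : List Char) :
    ∀ d pos, cs.length - pos ≤ d → ∀ c0 acc,
      pvALoop cs pos acc = pvBLoop cs pos false c0 acc := by
  intro d
  induction d with
  | zero =>
    intro pos hd c0 acc
    rw [pvALoop_stop cs pos acc (by omega), pvBLoop_stop_out cs pos c0 acc (by omega)]
  | succ d ih =>
    intro pos hd c0 acc
    by_cases hl : pos < cs.length
    · rcases pvFindMin2_spec cs pvMS1 pvMS2 pos (le_of_lt hl) with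
        ⟨hA, hnone⟩ | ⟨p, hA1, hkp, hmin, hsel⟩
      · -- no start marker: A returns at once, B scans to the end
        rw [pvALoop, dif_pos hl]
        rw [dif_pos hA]
        rw [pv_skip_out cs c0 acc (cs.length - pos) pos cs.length (le_of_lt hl) le_rfl
          (fun q h1 h2 => hnone q h1)]
        rw [pvBLoop_stop_out cs cs.length c0 acc (by omega)]
      · -- first start marker at p
        rw [pvALoop_eq_tail cs pos acc hl p hA1]
        rcases hsel with ⟨hm, hpre⟩ | ⟨hm, hpre, hnpre⟩
        · -- plain start marker
          have hne : pvMS1 ≠ [] := by decide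
          have hb := pv_match_bound cs pvMS1 p hne hpre
          have hplen : p < cs.length := by
            have : 0 < pvMS1.length := by decide
            omega
          rw [hm]
          rw [pv_inside_case cs pos (p + pvMS1.length) (lt_of_le_of_lt hkp (Nat.lt_add_of_pos_right (by decide))) hb acc
            (fun pos' hlt c0' acc' => ih pos' (by omega) c0' acc')]
          rw [pv_skip_out cs c0 acc (p - pos) pos p hkp le_rfl
            (fun q h1 h2 => hmin q h1 h2)]
          conv_rhs => rw [pvBLoop]
          have hsw : PySem.Chars.startswith (cs.drop p) pvMS1 = true :=
            (PySem.Chars.startswith_iff _ _).mpr hpre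
          simp [hplen, hsw]
        · -- CONTINUED start marker (the plain one does not match at p)
          have hne : pvMS2 ≠ [] := by decide
          have hb := pv_match_bound cs pvMS2 p hne hpre
          have hplen : p < cs.length := by
            have : 0 < pvMS2.length := by decide
            omega
          rw [hm]
          rw [pv_inside_case cs pos (p + pvMS2.length) (lt_of_le_of_lt hkp (Nat.lt_add_of_pos_right (by decide))) hb acc
            (fun pos' hlt c0' acc' => ih pos' (by omega) c0' acc')]
          rw [pv_skip_out cs c0 acc (p - pos) pos p hkp le_rfl
            (fun q h1 h2 => hmin q h1 h2)]
          conv_rhs => rw [pvBLoop]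
          have hsw1 : PySem.Chars.startswith (cs.drop p) pvMS1 = false := by
            rw [Bool.eq_false_iff, ne_eq, PySem.Chars.startswith_iff]; exact hnpre
          have hsw2 : PySem.Chars.startswith (cs.drop p) pvMS2 = true :=
            (PySem.Chars.startswith_iff _ _).mpr hpre
          simp [hplen, hsw1, hsw2]
    · rw [pvALoop_stop cs pos acc hl, pvBLoop_stop_out cs pos c0 acc hl]

-- ===== VERDICT (by name: the statement is the Claim_ definition above) =====
theorem collect_all_file_updates_sections_py_spec : Claim_equal_collect_all_file_updates_sections_py := by
  intro text _
  unfold Spec_collect_all_file_updates_sections_py collect_all_file_updates_sections_py collect_all_file_updates_sections_py_alt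
  rw [pv_main text.toList (text.toList.length) 0 (by omega) 0 []]
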